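-- pv_equiv track=rewrite | github.com/EleutherAI/polyapprox | experiments/torch_polyapprox/integrate.py | pair_partitions
-- ===== SOURCE A (Python) =====
-- def pair_partitions(elements: list) -> list:
--     """Iterate over all partitions of a list into pairs."""
--     if not elements:
--         yield []
--         return
--
--     pivot = elements[0]
--     for i in range(1, len(elements)):
--         partner = elements[i]
--         remaining = elements[1:i] + elements[i+1:]
--
--         for rest in pair_partitions(remaining):
--             yield [(pivot, partner)] + rest
-- ===== SOURCE B (Python) =====
-- def pair_partitions(elements: list) -> list:
--     """Iterate over all partitions of a list into pairs.
--
--     Iterative re-implementation: an explicit LIFO stack of frames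
--     (remaining elements, pairs accumulated so far) replaces the recursion.
--     Partner indices are pushed in reverse so pops happen in increasing
--     order, reproducing the recursive generator's yield order exactly.
--     """
--     stack = [(list(elements), [])]
--     while stack:
--         remaining, pairs = stack.pop()
--         if not remaining:
--             yield pairs
--             continue
--         pivot = remaining[0]
--         for i in reversed(range(1, len(remaining))):
--             stack.append((remaining[1:i] + remaining[i + 1:],
--                           pairs + [(pivot, remaining[i])]))
-- ===== Notes on version B (the rewrite author's own statement) =====
-- stated objective: alternative
-- what changed: Recursive generator replaced by an iterative explicit-stack (LIFO frame) traversal that accumulates the pairs in each frame and pushes partner choices in reverse to preserve the exact yield order.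
import Mathlib
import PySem

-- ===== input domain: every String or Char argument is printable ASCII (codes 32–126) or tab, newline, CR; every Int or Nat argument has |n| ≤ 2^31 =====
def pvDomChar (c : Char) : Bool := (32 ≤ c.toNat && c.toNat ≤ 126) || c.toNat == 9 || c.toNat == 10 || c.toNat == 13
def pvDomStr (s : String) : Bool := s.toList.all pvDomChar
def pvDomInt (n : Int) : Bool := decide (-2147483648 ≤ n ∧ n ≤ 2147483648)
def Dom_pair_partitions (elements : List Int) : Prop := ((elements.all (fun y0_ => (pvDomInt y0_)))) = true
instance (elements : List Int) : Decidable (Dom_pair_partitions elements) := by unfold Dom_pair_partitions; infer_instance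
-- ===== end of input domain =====

-- B replaces A's recursive generator by an iterative explicit-stack traversal of the
-- same choice tree (objective: alternative decomposition, same cost); return values proved equal.

-- ===== PORT A =====
-- Literal port of A (as a list-returning function), recursion made structural on a fuel
-- counter that is a totality guard only (fuel = length + 1 always suffices; the 0 branch is
-- never reached). range(1, len(elements)) is List.range' 1 (len - 1); elements[1:i] =
-- (take i).drop 1 and elements[i+1:] = drop (i+1) are exact for 1 ≤ i < len
-- (slice_natCast / slice_from_natCast); elements[0]/elements[i] = headI / getD (in range).
def pairPartsFuel : Nat → List Int → List (List (Int × Int))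
  | 0, _ => []
  | fuel + 1, elements =>
    if elements.isEmpty then [[]]
    else
      ((List.range' 1 (elements.length - 1)).map (fun i =>
        let partner := elements.getD i 0
        let remaining := (elements.take i).drop 1 ++ elements.drop (i + 1)
        (pairPartsFuel fuel remaining).map (fun rest => (elements.headI, partner) :: rest))).flatten

def pair_partitions (elements : List Int) : List (List (Int × Int)) :=
  pairPartsFuel (elements.length + 1) elements

-- ===== PORT B =====
-- The frames pushed when popping frame (r, p) with r nonempty, top of stack first:
-- Python pushes partner indices in reversed order, so pop order is increasing i = 1 .. len r - 1.
def ppFrames (r : List Int) (p : List (Int × Int)) : List (List Int × List (Int × Int)) :=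
  (List.range' 1 (r.length - 1)).map (fun i =>
    ((r.take i).drop 1 ++ r.drop (i + 1), p ++ [(r.headI, r.getD i 0)]))

-- The main loop: pop a frame; empty remaining yields its pairs, otherwise push child frames.
-- Fuel is a totality guard only: the loop runs at most (sum over frames of |r|!) steps, so the
-- initial fuel n! + 1 below is never exhausted (proved in ppLoopFuel_eq).
def ppLoopFuel : Nat → List (List Int × List (Int × Int)) → List (List (Int × Int))
  | 0, _ => []
  | _ + 1, [] => []
  | fuel + 1, (r, p) :: rest =>
    if r.isEmpty then p :: ppLoopFuel fuel rest
    else ppLoopFuel fuel (ppFrames r p ++ rest)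

def pair_partitions_alt (elements : List Int) : List (List (Int × Int)) :=
  ppLoopFuel (elements.length.factorial + 1) [(elements, [])]

-- ===== PRECONDITION & SPEC =====
def Spec_pair_partitions (elements : List Int) (out : List (List (Int × Int))) : Prop := out = pair_partitions_alt elements
instance (elements : List Int) (out : List (List (Int × Int))) : Decidable (Spec_pair_partitions elements out) := by unfold Spec_pair_partitions; infer_instance

-- ===== CLAIM (what is proved, stated in full; the proofs are below) =====
def Claim_equal_pair_partitions : Prop := ∀ (elements : List Int), Dom_pair_partitions elements → Spec_pair_partitions elements (pair_partitions elements)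

-- ===== LEMMAS AND PROOFS =====

-- the remaining list handed to a recursive call / child frame is two elements shorter
theorem pp_rem_length (r : List Int) (i : Nat)
    (h : i ∈ List.range' 1 (r.length - 1)) :
    ((r.take i).drop 1 ++ r.drop (i + 1)).length = r.length - 2 := by
  have h' := List.mem_range'_1.mp h
  simp only [List.length_append, List.length_drop, List.length_take]
  omega

-- fuel does not matter as long as it exceeds the list length
theorem pairPartsFuel_irrel (f1 : Nat) : ∀ (f2 : Nat) (xs : List Int),
    xs.length < f1 → xs.length < f2 → pairPartsFuel f1 xs = pairPartsFuel f2 xs := by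
  induction f1 with
  | zero => intro f2 xs h1 _; omega
  | succ k ih =>
    intro f2 xs h1 h2
    cases f2 with
    | zero => omega
    | succ k2 =>
      simp only [pairPartsFuel]
      by_cases hxs : xs.isEmpty
      · simp [hxs]
      · rw [if_neg hxs, if_neg hxs]
        refine congrArg List.flatten (List.map_congr_left (fun i hi => ?_))
        have hlen := pp_rem_length xs i hi
        have hne : xs.length ≠ 0 := by simpa [List.isEmpty_iff, List.length_eq_zero_iff] using hxs
        congr 1
        exact ih k2 _ (by omega) (by omega)

-- A's recursive step, stated fuel-free
theorem pair_partitions_nonempty (r : List Int) (hr : ¬ r.isEmpty) :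
    pair_partitions r = ((List.range' 1 (r.length - 1)).map (fun i =>
      (pair_partitions ((r.take i).drop 1 ++ r.drop (i + 1))).map
        (fun rest => (r.headI, r.getD i 0) :: rest))).flatten := by
  conv_lhs => rw [pair_partitions, pairPartsFuel]
  rw [if_neg hr]
  refine congrArg List.flatten (List.map_congr_left (fun i hi => ?_))
  have hlen := pp_rem_length r i hi
  have hne : r.length ≠ 0 := by simpa [List.isEmpty_iff, List.length_eq_zero_iff] using hr
  unfold pair_partitions
  refine congrArg (List.map _) (pairPartsFuel_irrel r.length _ _ ?_ ?_) <;> omega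

theorem pair_partitions_nil : pair_partitions [] = [[]] := rfl

-- the loop's termination measure: each processed frame of remaining length n costs at most n! steps
def ppMeasure (stack : List (List Int × List (Int × Int))) : Nat :=
  (stack.map (fun f => f.1.length.factorial)).sum

theorem ppFrames_measure (r : List Int) (p : List (Int × Int)) (hr : r ≠ []) :
    ppMeasure (ppFrames r p) < r.length.factorial := by
  have hn : 1 ≤ r.length := List.length_pos_iff.mpr hr
  have hmap : ((ppFrames r p).map (fun f => f.1.length.factorial)) =
      (List.range' 1 (r.length - 1)).map (fun i => (r.length - 2).factorial) := by
    unfold ppFrames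
    rw [List.map_map]
    refine List.map_congr_left (fun i hi => ?_)
    have h := pp_rem_length r i hi
    simp only [Function.comp]
    rw [h]
  unfold ppMeasure
  rw [hmap, List.map_const', List.sum_replicate, smul_eq_mul, List.length_range']
  rcases Nat.lt_or_ge r.length 2 with h2 | h2
  · have h1 : r.length = 1 := by omega
    simp [h1]
  · have e1 : (r.length - 1).factorial = (r.length - 1) * (r.length - 2).factorial := by
      have : r.length - 1 = (r.length - 2) + 1 := by omega
      rw [this, Nat.factorial_succ]
    have e2 : r.length.factorial = r.length * (r.length - 1).factorial := by
      have : r.length = (r.length - 1) + 1 := by omega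
      conv_lhs => rw [this, Nat.factorial_succ]
      congr 1; omega
    have hpos : 0 < (r.length - 1).factorial := Nat.factorial_pos _
    calc (r.length - 1) * (r.length - 2).factorial = (r.length - 1).factorial := e1.symm
      _ < r.length * (r.length - 1).factorial := by nlinarith [hpos]
      _ = r.length.factorial := e2.symm

-- Processing the child frames of (r, p) produces exactly A's results for r, each prefixed by p.
theorem flatMap_ppFrames (r : List Int) (p : List (Int × Int)) (hr : ¬ r.isEmpty) :
    (ppFrames r p).flatMap (fun f => (pair_partitions f.1).map (fun rest => f.2 ++ rest)) =
      (pair_partitions r).map (fun rest => p ++ rest) := by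
  rw [pair_partitions_nonempty r hr]
  unfold ppFrames
  rw [List.flatMap_def, List.map_map, List.map_flatten, List.map_map]
  congr 1
  refine List.map_congr_left (fun i hi => ?_)
  simp only [Function.comp]
  rw [List.map_map]
  refine List.map_congr_left (fun rest _ => ?_)
  rw [List.append_assoc]
  rfl

-- Loop invariant: with enough fuel, the stack's output is the concatenation, frame by frame,
-- of A's results on each frame's remaining list, prefixed by that frame's pairs.
theorem ppLoopFuel_eq (fuel : Nat) : ∀ (stack : List (List Int × List (Int × Int))),
    ppMeasure stack < fuel →
    ppLoopFuel fuel stack = stack.flatMap (fun f => (pair_partitions f.1).map (fun rest => f.2 ++ rest)) := by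
  induction fuel with
  | zero => intro stack h; exact absurd h (by omega)
  | succ k ih =>
    intro stack h
    match stack with
    | [] => simp [ppLoopFuel]
    | (r, p) :: rest =>
      have hm : ppMeasure ((r, p) :: rest) = r.length.factorial + ppMeasure rest := by
        simp [ppMeasure]
      by_cases hr : r.isEmpty
      · have hr' : r = [] := List.isEmpty_iff.mp hr
        subst hr'
        have hrest : ppMeasure rest < k := by
          simp only [ppMeasure, List.map_cons, List.sum_cons, List.length_nil,
            Nat.factorial_zero] at h ⊢
          omega
        simp only [ppLoopFuel, List.isEmpty_nil, if_true]
        rw [ih rest hrest]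
        simp [pair_partitions_nil]
      · simp only [ppLoopFuel]
        rw [if_neg hr]
        have hfac := Nat.factorial_pos r.length
        have hmeas : ppMeasure (ppFrames r p ++ rest) < k := by
          have hsplit : ppMeasure (ppFrames r p ++ rest) = ppMeasure (ppFrames r p) + ppMeasure rest := by
            simp [ppMeasure]
          have hfr := ppFrames_measure r p (by simpa [List.isEmpty_iff] using hr)
          omega
        rw [ih _ hmeas, List.flatMap_append, flatMap_ppFrames r p hr, List.flatMap_cons]

-- ===== VERDICT (by name: the statement is the Claim_ definition above) =====
theorem pair_partitions_spec : Claim_equal_pair_partitions := by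
  intro elements _
  unfold Spec_pair_partitions pair_partitions_alt
  rw [ppLoopFuel_eq _ [(elements, [])] (by simp [ppMeasure])]
  simp
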